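-- pv_equiv track=rewrite | github.com/SGit-AI/SGit-AI__CLI | sgit_ai/sync/Vault__Sub_Tree.py | _populate_dir_contents
-- ===== SOURCE A (Python) =====
-- def _populate_dir_contents(paths) -> tuple:
--     """Build dir_contents dict and all_dirs set from flat relative paths."""
--     dir_contents = {}
--     all_dirs     = set()
--     for rel_path in sorted(paths):
--         parts = rel_path.split('/')
--         if len(parts) == 1:
--             dir_contents.setdefault('', []).append((parts[0], rel_path))
--         else:
--             dir_path = '/'.join(parts[:-1])
--             filename = parts[-1]
--             dir_contents.setdefault(dir_path, []).append((filename, rel_path))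
--             for i in range(1, len(parts)):
--                 all_dirs.add('/'.join(parts[:i]))
--     for d in all_dirs:
--         dir_contents.setdefault(d, [])
--     dir_contents.setdefault('', [])
--     return dir_contents, all_dirs
-- ===== SOURCE B (Python) =====
-- def _populate_dir_contents(paths) -> tuple:
--     """Build dir_contents dict and all_dirs set from flat relative paths."""
--     dir_contents = {}
--     ordered_dirs = []   # every directory exactly once, in order of first appearance
--     prev = ''
--     for rel_path in sorted(paths):
--         # Length of the longest common prefix with the previous path.  In a
--         # sorted list every ancestor directory shared with ANY earlier path is
--         # shared with the immediately preceding path, so an ancestor is new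
--         # exactly when it reaches past this common prefix: no set membership
--         # tests are needed to deduplicate.
--         k = 0
--         while k < len(prev) and k < len(rel_path) and prev[k] == rel_path[k]:
--             k += 1
--         parts = rel_path.split('/')
--         dir_contents.setdefault('/'.join(parts[:-1]), []).append((parts[-1], rel_path))
--         d = parts[0]
--         for part in parts[1:]:
--             if len(d) >= k:
--                 ordered_dirs.append(d)
--             d += '/' + part
--         prev = rel_path
--     for d in ordered_dirs:
--         dir_contents.setdefault(d, [])
--     dir_contents.setdefault('', [])
--     return dir_contents, set(ordered_dirs)
-- ===== Notes on version B (the rewrite author's own statement) =====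
-- stated objective: alternative
-- what changed: A deduplicates ancestor directories by adding every ancestor of every path to a set; B exploits the sorted order instead: an ancestor directory is new exactly when it reaches past the longest common prefix with the immediately preceding path, so all_dirs is collected as a plain duplicate-free list with no set-membership tests, and the dict key is computed branchlessly as '/'.join(parts[:-1]).
import Mathlib
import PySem

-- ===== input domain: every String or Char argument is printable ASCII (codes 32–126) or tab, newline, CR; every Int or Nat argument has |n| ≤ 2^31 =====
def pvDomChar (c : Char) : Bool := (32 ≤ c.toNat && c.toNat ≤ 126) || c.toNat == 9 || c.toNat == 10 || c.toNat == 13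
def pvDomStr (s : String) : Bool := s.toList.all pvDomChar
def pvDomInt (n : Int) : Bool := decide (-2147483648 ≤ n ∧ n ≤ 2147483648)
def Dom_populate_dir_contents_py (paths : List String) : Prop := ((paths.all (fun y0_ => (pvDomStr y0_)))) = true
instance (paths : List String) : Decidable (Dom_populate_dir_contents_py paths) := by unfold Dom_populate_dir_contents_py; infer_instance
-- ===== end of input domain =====

-- B replaces A's per-path "add every ancestor to a set" loop by a sortedness-based scheme: an ancestor
-- directory is new exactly when it reaches past the longest common prefix with the previous sorted path,
-- so all_dirs is built as a plain duplicate-free list with no set-membership tests; the dict key is the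
-- branchless '/'.join(parts[:-1]). Return-value equivalence only (neither mutates its argument).


-- rel_path.split('/'): the separator "/" is nonempty, so PySem.Str.split? is always `some`
def pvSplitSlash (s : String) : List String := (PySem.Str.split? s "/").getD []

-- hand-port of Source B's index while-loop computing the longest-common-prefix length of two strings;
-- exact: it performs the same character comparisons in the same order
def pvLcp : List Char → List Char → Nat
  | a :: as, b :: bs => if a = b then pvLcp as bs + 1 else 0
  | _, _ => 0

-- ===== PORT A =====
def populate_dir_contents_py (paths : List String) : (List (String × List (String × String))) × List String :=
  let st := (PySem.List.sorted paths (fun x => x) false).foldl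
    (fun (st : PySem.Dict String (List (String × String)) × PySem.Set String) rel_path =>
      let parts := pvSplitSlash rel_path
      if parts.length = 1 then
        (st.1.modify "" [] (fun l => l ++ [(PySem.List.pyGetD parts 0 "", rel_path)]), st.2)
      else
        let dir_path := PySem.Str.join "/" (PySem.List.slice parts none (some (-1)))
        let filename := PySem.List.pyGetD parts (-1) ""
        let dc := st.1.modify dir_path [] (fun l => l ++ [(filename, rel_path)])
        let ad := (PySem.List.pyRange 1 (parts.length : Int)).foldl
          (fun s i => PySem.Set.add s (PySem.Str.join "/" (PySem.List.slice parts none (some i)))) st.2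
        (dc, ad))
    (PySem.Dict.empty, PySem.Set.empty)
  let dc := st.2.foldl (fun d k => PySem.Dict.setdefault d k []) st.1
  let dc := PySem.Dict.setdefault dc "" []
  (dc.items, st.2)

-- ===== PORT B =====
def populate_dir_contents_py_alt (paths : List String) : (List (String × List (String × String))) × List String :=
  let st := (PySem.List.sorted paths (fun x => x) false).foldl
    (fun (st : PySem.Dict String (List (String × String)) × List String × String) rel_path =>
      -- k = 0; while k < len(prev) and k < len(rel_path) and prev[k] == rel_path[k]: k += 1
      let k := pvLcp st.2.2.toList rel_path.toList
      let parts := pvSplitSlash rel_path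
      let dc := st.1.modify (PySem.Str.join "/" (PySem.List.slice parts none (some (-1)))) []
        (fun l => l ++ [(PySem.List.pyGetD parts (-1) "", rel_path)])
      let fin := (PySem.List.slice parts (some 1) none).foldl
        (fun (q : List String × String) part =>
          ((if (k : Int) ≤ PySem.Str.len q.2 then q.1 ++ [q.2] else q.1), q.2 ++ "/" ++ part))
        (st.2.1, PySem.List.pyGetD parts 0 "")
      (dc, fin.1, rel_path))
    (PySem.Dict.empty, [], "")
  let dc := st.2.1.foldl (fun d x => PySem.Dict.setdefault d x []) st.1
  let dc := PySem.Dict.setdefault dc "" []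
  (dc.items, PySem.Set.ofList st.2.1)

-- ===== PRECONDITION & SPEC =====
def Spec_populate_dir_contents_py (paths : List String) (out : (List (String × List (String × String))) × List String) : Prop := out = populate_dir_contents_py_alt paths
instance (paths : List String) (out : (List (String × List (String × String))) × List String) : Decidable (Spec_populate_dir_contents_py paths out) := by unfold Spec_populate_dir_contents_py; infer_instance

-- ===== CLAIM (what is proved, stated in full; the proofs are below) =====
def Claim_equal_populate_dir_contents_py : Prop := ∀ (paths : List String), Dom_populate_dir_contents_py paths → Spec_populate_dir_contents_py paths (populate_dir_contents_py paths)

-- ===== LEMMAS AND PROOFS =====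

-- the dict update both programs perform for one path (B's branchless form)
def pvStepD (d : PySem.Dict String (List (String × String))) (rel : String) :
    PySem.Dict String (List (String × String)) :=
  d.modify (PySem.Str.join "/" (PySem.List.slice (pvSplitSlash rel) none (some (-1)))) []
    (fun l => l ++ [(PySem.List.pyGetD (pvSplitSlash rel) (-1) "", rel)])

-- the parent parts of a path
def pvDP (p : String) : List String := (pvSplitSlash p).dropLast

-- the ancestor directories of a path, shallowest first
def pvPrefList (dp : List String) : List String :=
  (List.range dp.length).map (fun i => PySem.Str.join "/" (dp.take (i + 1)))

-- A's effect on all_dirs for one path, as a fold over pvPrefList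
def pvAddDirs (s : PySem.Set String) (p : String) : PySem.Set String :=
  (pvPrefList (pvDP p)).foldl PySem.Set.add s

-- B's emissions for one path: the ancestors reaching past the common prefix with the previous path
def pvEmit (prev p : String) : List String :=
  (pvPrefList (pvDP p)).filter
    (fun x => decide ((pvLcp prev.toList p.toList : Int) ≤ PySem.Str.len x))

-- B's whole ordered_dirs list
def pvBDirs (prev : String) : List String → List String
  | [] => []
  | p :: t => pvEmit prev p ++ pvBDirs p t

-- "d is an ancestor directory of q" as a character condition
def pvSdir (d q : String) : Prop := (d.toList ++ ['/']) <+: q.toList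

theorem pv_go_spec (fuel : Nat) (l cur : List Char) (acc : List (List Char))
    (h : l.length < fuel) :
    PySem.Chars.splitOn.go ['/'] fuel l cur acc
      = acc.reverse ++ (List.splitOnP (· == '/') l).modifyHead (cur.reverse ++ ·) := by
  induction fuel generalizing l cur acc with
  | zero => omega
  | succ f ih =>
    cases l with
    | nil =>
      rw [PySem.Chars.splitOn.go.eq_def]
      simp [List.splitOnP_nil]
    | cons c rest =>
      rw [PySem.Chars.splitOn.go.eq_def]
      simp only [List.splitOnP_cons]
      by_cases hc : c = '/'
      · subst hc
        have hpre : List.isPrefixOf ['/'] ('/' :: rest) = true := by simp [List.isPrefixOf]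
        rw [if_pos hpre]
        simp only [List.length_cons] at h
        rw [ih _ _ _ (by simpa using Nat.lt_of_succ_lt_succ h)]
        obtain ⟨hd, tl, he⟩ := List.exists_cons_of_ne_nil (List.splitOnP_ne_nil (· == '/') rest)
        simp [he]
      · have hpre : List.isPrefixOf ['/'] (c :: rest) = false := by
          simp [List.isPrefixOf]
          exact fun he => hc he.symm
        rw [if_neg (by simp [hpre])]
        simp only [List.length_cons] at h
        rw [ih _ _ _ (Nat.lt_of_succ_lt_succ h)]
        have hne := List.splitOnP_ne_nil (· == '/') rest
        obtain ⟨hd, tl, he⟩ := List.exists_cons_of_ne_nil hne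
        rw [he]
        simp [hc]

theorem pv_splitOn_eq (cs : List Char) :
    PySem.Chars.splitOn cs ['/'] = List.splitOnP (· == '/') cs := by
  rw [PySem.Chars.splitOn, pv_go_spec _ _ _ _ (Nat.lt_succ_self _)]
  obtain ⟨hd, tl, he⟩ := List.exists_cons_of_ne_nil (List.splitOnP_ne_nil (· == '/') cs)
  simp [he]

theorem pv_splitSlash_eq (p : String) :
    pvSplitSlash p = (List.splitOnP (· == '/') p.toList).map String.ofList := by
  rw [pvSplitSlash, PySem.Str.split?]
  simp [PySem.Chars.split?, pv_splitOn_eq]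

theorem pv_splitSlash_ne_nil (p : String) : pvSplitSlash p ≠ [] := by
  rw [pv_splitSlash_eq]
  simp [List.splitOnP_ne_nil]

theorem pv_splitOnP_no_slash (cs : List Char) :
    ∀ l ∈ List.splitOnP (· == '/') cs, '/' ∉ l := by
  induction cs with
  | nil => simp [List.splitOnP_nil]
  | cons c rest ih =>
    rw [List.splitOnP_cons]
    by_cases hc : c = '/'
    · simp only [hc, beq_self_eq_true, if_pos]
      intro l hl
      rcases List.mem_cons.mp hl with rfl | hl
      · simp
      · exact ih l hl
    · rw [if_neg (by simp [hc])]
      obtain ⟨hd, tl, he⟩ := List.exists_cons_of_ne_nil (List.splitOnP_ne_nil (· == '/') rest)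
      rw [he]
      intro l hl
      rcases List.mem_cons.mp hl with rfl | hl
      · intro hmem
        rcases List.mem_cons.mp hmem with rfl | hmem
        · exact hc rfl
        · exact ih hd (by simp [he]) hmem
      · exact ih l (by simp [he, hl])

theorem pv_join_splitOnP (cs : List Char) :
    PySem.Chars.join ['/'] (List.splitOnP (· == '/') cs) = cs := by
  have h := List.intercalate_splitOn cs '/'
  simpa [List.splitOn, PySem.Chars.join] using h

theorem pv_join_cons (a : List Char) (l : List (List Char)) (hl : l ≠ []) :
    PySem.Chars.join ['/'] (a :: l) = a ++ '/' :: PySem.Chars.join ['/'] l := by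
  obtain ⟨b, t, rfl⟩ := List.exists_cons_of_ne_nil hl
  rw [PySem.Chars.join_cons_cons]
  simp

theorem pv_join_append (A B : List (List Char)) (hA : A ≠ []) (hB : B ≠ []) :
    PySem.Chars.join ['/'] (A ++ B)
      = PySem.Chars.join ['/'] A ++ '/' :: PySem.Chars.join ['/'] B := by
  induction A with
  | nil => exact absurd rfl hA
  | cons a A' ih =>
    cases A' with
    | nil => simpa [PySem.Chars.join_singleton] using pv_join_cons a B hB
    | cons a2 A'' =>
      rw [List.cons_append, pv_join_cons a ((a2 :: A'') ++ B) (by simp),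
        ih (by simp), pv_join_cons a (a2 :: A'') (by simp)]
      simp

-- the toList of a prefix-join over pvDP

theorem pv_core (parts : List (List Char)) (hne : parts ≠ [])
    (hns : ∀ l ∈ parts, '/' ∉ l) (u : List Char) :
    (u ++ ['/'] <+: PySem.Chars.join ['/'] parts)
      ↔ ∃ i, i < parts.length - 1 ∧ u = PySem.Chars.join ['/'] (parts.take (i + 1)) := by
  induction parts generalizing u with
  | nil => exact absurd rfl hne
  | cons a rest ih =>
    cases rest with
    | nil =>
      simp only [PySem.Chars.join_singleton]
      constructor
      · intro h
        exact absurd (h.subset (by simp)) (hns a (by simp))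
      · rintro ⟨i, hi, -⟩
        simp at hi
    | cons b rr =>
      rw [pv_join_cons a (b :: rr) (by simp)]
      have hsplit : a ++ '/' :: PySem.Chars.join ['/'] (b :: rr)
          = (a ++ ['/']) ++ PySem.Chars.join ['/'] (b :: rr) := by simp
      constructor
      · intro h
        rcases Nat.lt_trichotomy u.length a.length with hlt | heq | hgt
        · exfalso
          have hu : u ++ ['/'] <+: a ++ '/' :: PySem.Chars.join ['/'] (b :: rr) := h
          have ha : a <+: a ++ '/' :: PySem.Chars.join ['/'] (b :: rr) := List.prefix_append a _
          rcases List.prefix_or_prefix_of_prefix hu ha with hp | hp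
          · exact absurd (hp.subset (by simp)) (hns a (by simp))
          · have hlen : a.length = (u ++ ['/']).length := by
              have := hp.length_le; simp at this ⊢; omega
            have : a = u ++ ['/'] := hp.eq_of_length hlen
            exact absurd (by rw [this]; simp) (hns a (by simp))
        · have hu : u <+: a ++ '/' :: PySem.Chars.join ['/'] (b :: rr) :=
            (List.prefix_append u ['/']).trans h
          have ha : a <+: a ++ '/' :: PySem.Chars.join ['/'] (b :: rr) := List.prefix_append a _
          have hua : u = a := by
            rcases List.prefix_or_prefix_of_prefix hu ha with hp | hp
            · exact hp.eq_of_length heq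
            · exact (hp.eq_of_length heq.symm).symm
          exact ⟨0, by simp, by simpa [PySem.Chars.join_singleton] using hua⟩
        · have hpu : a ++ ['/'] <+: u := by
            have hu : u <+: a ++ '/' :: PySem.Chars.join ['/'] (b :: rr) :=
              (List.prefix_append u ['/']).trans h
            have ha : a ++ ['/'] <+: a ++ '/' :: PySem.Chars.join ['/'] (b :: rr) := by
              rw [hsplit]; exact List.prefix_append _ _
            rcases List.prefix_or_prefix_of_prefix ha hu with hp | hp
            · exact hp
            · have hlen : u.length = (a ++ ['/']).length := by
                have := hp.length_le; simp at this ⊢; omega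
              rw [hp.eq_of_length hlen]
          obtain ⟨u', rfl⟩ := hpu
          rw [hsplit, List.append_assoc] at h
          have h' : u' ++ ['/'] <+: PySem.Chars.join ['/'] (b :: rr) :=
            (List.prefix_append_right_inj (a ++ ['/'])).mp h
          obtain ⟨j, hj, hju⟩ := (ih (by simp) (fun l hl => hns l (by simp [hl])) u').mp h'
          refine ⟨j + 1, by simp at hj ⊢; omega, ?_⟩
          rw [List.take_succ_cons, pv_join_cons a ((b :: rr).take (j + 1)) (by simp), hju]
          simp
      · rintro ⟨i, hi, rfl⟩
        cases i with
        | zero =>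
          simp only [List.take_succ_cons, List.take_zero, PySem.Chars.join_singleton]
          exact ⟨PySem.Chars.join ['/'] (b :: rr), by simp⟩
        | succ j =>
          have hj : j < (b :: rr).length - 1 := by simp at hi ⊢; omega
          have h' := (ih (by simp) (fun l hl => hns l (by simp [hl]))
            (PySem.Chars.join ['/'] ((b :: rr).take (j + 1)))).mpr ⟨j, hj, rfl⟩
          rw [List.take_succ_cons, pv_join_cons a ((b :: rr).take (j + 1)) (by simp)]
          obtain ⟨w, hw⟩ := h'
          exact ⟨w, by simpa using hw⟩

theorem pvLcp_le (a b : List Char) : pvLcp a b ≤ a.length ∧ pvLcp a b ≤ b.length := by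
  induction a generalizing b with
  | nil => simp [pvLcp]
  | cons x as ih =>
    cases b with
    | nil => simp [pvLcp]
    | cons y bs =>
      by_cases h : x = y
      · simp only [pvLcp, if_pos h, List.length_cons]
        have := ih bs
        omega
      · simp [pvLcp, h]

theorem pvLcp_take (a b : List Char) : a.take (pvLcp a b) = b.take (pvLcp a b) := by
  induction a generalizing b with
  | nil => simp [pvLcp]
  | cons x as ih =>
    cases b with
    | nil => simp [pvLcp]
    | cons y bs =>
      by_cases h : x = y
      · subst h
        simp [pvLcp, List.take_succ_cons, ih bs]
      · simp [pvLcp, h]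

theorem pvLcp_ge (a b : List Char) (n : Nat) (hna : n ≤ a.length) (hnb : n ≤ b.length)
    (h : a.take n = b.take n) : n ≤ pvLcp a b := by
  induction a generalizing b n with
  | nil => simp at hna; omega
  | cons x as ih =>
    cases n with
    | zero => omega
    | succ m =>
      cases b with
      | nil => simp at hnb
      | cons y bs =>
        simp only [List.take_succ_cons, List.cons.injEq] at h
        simp only [pvLcp, if_pos h.1]
        have := ih bs m (by simp at hna; omega) (by simp at hnb; omega) h.2
        omega

theorem pv_between_chars (u : List Char) : ∀ (x y z : List Char),
    ¬ List.Lex (· < ·) y x → ¬ List.Lex (· < ·) z y →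
    u <+: x → u <+: z → u <+: y := by
  induction u with
  | nil => intro _ _ _ _ _ _ _; exact List.nil_prefix
  | cons c u' ih =>
    intro x y z hxy hyz hux huz
    obtain ⟨x', rfl⟩ : ∃ x', x = c :: x' := by
      obtain ⟨t, ht⟩ := hux; exact ⟨u' ++ t, by rw [← ht]; simp⟩
    obtain ⟨z', rfl⟩ : ∃ z', z = c :: z' := by
      obtain ⟨t, ht⟩ := huz; exact ⟨u' ++ t, by rw [← ht]; simp⟩
    cases y with
    | nil => exact absurd (List.Lex.nil) hxy
    | cons d y' =>
      have hdc : ¬ d < c := fun hl => hxy (List.cons_lex_cons_iff.mpr (Or.inl hl))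
      have hcd : ¬ c < d := fun hl => hyz (List.cons_lex_cons_iff.mpr (Or.inl hl))
      have hdc' : d = c := le_antisymm (not_lt.mp hcd) (not_lt.mp hdc)
      subst hdc'
      have h1 : ¬ List.Lex (· < ·) y' x' := fun hl => hxy (List.cons_lex_cons_iff.mpr (Or.inr ⟨rfl, hl⟩))
      have h2 : ¬ List.Lex (· < ·) z' y' := fun hl => hyz (List.cons_lex_cons_iff.mpr (Or.inr ⟨rfl, hl⟩))
      exact List.cons_prefix_cons.mpr ⟨rfl, ih x' y' z' h1 h2
        (List.cons_prefix_cons.mp hux).2 (List.cons_prefix_cons.mp huz).2⟩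

theorem pv_le_lex {s t : String} (h : s ≤ t) : ¬ List.Lex (· < ·) t.toList s.toList := by
  intro hlex
  have h' := String.le_iff_toList_le.mp h
  exact absurd ((List.lt_iff_lex_lt _ _).mpr hlex) (not_lt.mpr h')

theorem pv_mem_foldl_add_iff (l : List String) (s : PySem.Set String) (d : String) :
    d ∈ l.foldl PySem.Set.add s ↔ d ∈ s ∨ d ∈ l := by
  induction l generalizing s with
  | nil => simp
  | cons x t ih =>
    rw [List.foldl_cons, ih]
    rw [PySem.Set.mem_add]
    constructor
    · rintro (⟨h | h⟩ | h) <;> simp [h]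
    · rintro (h | h)
      · exact Or.inl (Or.inl h)
      · rcases List.mem_cons.mp h with rfl | h
        · exact Or.inl (Or.inr rfl)
        · exact Or.inr h

theorem pv_foldl_add_eq_append (l : List String) (hl : l.Nodup) (s : PySem.Set String) :
    l.foldl PySem.Set.add s = s ++ l.filter (fun x => !s.contains x) := by
  induction l generalizing s with
  | nil => simp
  | cons x t ih =>
    have hx : x ∉ t := (List.nodup_cons.mp hl).1
    have ht : t.Nodup := (List.nodup_cons.mp hl).2
    rw [List.foldl_cons]
    by_cases hc : s.contains x
    · rw [List.filter_cons_of_neg (by simp [(PySem.Set.contains_iff s x).mp hc])]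
      rw [PySem.Set.add, if_pos hc]
      exact ih ht s
    · rw [List.filter_cons_of_pos (by simp; exact fun hm => hc ((PySem.Set.contains_iff s x).mpr hm))]
      rw [PySem.Set.add, if_neg hc]
      rw [ih ht (s ++ [x])]
      rw [List.append_assoc]
      congr 1
      rw [List.singleton_append]
      congr 1
      apply List.filter_congr
      intro y hy
      have hyx : y ≠ x := fun he => hx (he ▸ hy)
      cases hcy : s.contains y <;> simp_all

theorem pv_nodup_foldl_add (l : List String) (s : PySem.Set String) (hs : s.Nodup) :
    (l.foldl PySem.Set.add s).Nodup := by
  induction l generalizing s with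
  | nil => exact hs
  | cons x t ih =>
    rw [List.foldl_cons]
    refine ih _ ?_
    rw [PySem.Set.add]
    by_cases hc : s.contains x
    · rw [if_pos hc]; exact hs
    · rw [if_neg hc]
      refine List.Nodup.append hs (by simp) ?_
      intro a ha hb
      exact hc ((PySem.Set.contains_iff s x).mpr ((List.mem_singleton.mp hb) ▸ ha))

theorem pv_ofList_eq_self (l : List String) (hl : l.Nodup) : PySem.Set.ofList l = l := by
  rw [PySem.Set.ofList_eq_foldl, pv_foldl_add_eq_append l hl []]
  simp

theorem pv_prefJoin_toList (p : String) (i : Nat) :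
    (PySem.Str.join "/" ((pvDP p).take (i + 1))).toList
      = PySem.Chars.join ['/'] (((List.splitOnP (· == '/') p.toList).dropLast).take (i + 1)) := by
  rw [PySem.Str.toList_join, pvDP, pv_splitSlash_eq]
  have h1 : ((List.splitOnP (· == '/') p.toList).map String.ofList).dropLast
      = ((List.splitOnP (· == '/') p.toList).dropLast).map String.ofList := by
    rw [List.map_dropLast]
  rw [h1, ← List.map_take, List.map_map]
  have : (String.toList ∘ String.ofList) = id := by
    funext l; simp
  rw [this, List.map_id]
  rfl

theorem pv_dp_length (p : String) :
    (pvDP p).length = (List.splitOnP (· == '/') p.toList).length - 1 := by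
  rw [pvDP, pv_splitSlash_eq]
  simp

theorem pv_take_dropLast (parts : List (List Char)) (i : Nat) (hi : i + 1 ≤ parts.length - 1) :
    (parts.dropLast).take (i + 1) = parts.take (i + 1) := by
  rw [List.dropLast_eq_take, List.take_take]
  congr 1
  omega

theorem pv_mem_prefList_iff (p d : String) : d ∈ pvPrefList (pvDP p) ↔ pvSdir d p := by
  have hne := List.splitOnP_ne_nil (· == '/') p.toList
  have hns := pv_splitOnP_no_slash p.toList
  have hcore := pv_core _ hne hns d.toList
  rw [pv_join_splitOnP] at hcore
  rw [pvSdir, hcore, pvPrefList]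
  simp only [List.mem_map, List.mem_range]
  constructor
  · rintro ⟨i, hi, rfl⟩
    rw [pv_dp_length] at hi
    refine ⟨i, by omega, ?_⟩
    rw [pv_prefJoin_toList, pv_take_dropLast _ _ (by omega)]
  · rintro ⟨i, hi, hd⟩
    refine ⟨i, by rw [pv_dp_length]; omega, ?_⟩
    apply String.ext_iff.mpr
    rw [pv_prefJoin_toList, pv_take_dropLast _ _ (by omega), hd]

theorem pv_prefList_len_mono (p : String) (i j : Nat) (hij : i < j) (hj : j < (pvDP p).length) :
    (PySem.Str.join "/" ((pvDP p).take (i + 1))).toList.length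
      < (PySem.Str.join "/" ((pvDP p).take (j + 1))).toList.length := by
  rw [pv_prefJoin_toList, pv_prefJoin_toList]
  set M := (List.splitOnP (· == '/') p.toList).dropLast with hM
  have hjM : j < M.length := by
    rw [hM, List.length_dropLast]; rw [pv_dp_length] at hj; omega
  have hsplit : M.take (j + 1) = M.take (i + 1) ++ (M.drop (i + 1)).take (j - i) := by
    rw [← List.take_add]
    congr 1
    omega
  rw [hsplit, pv_join_append _ _ (by
    apply List.ne_nil_of_length_pos
    rw [List.length_take]
    omega) ?hB]
  case hB =>
    have : ((M.drop (i + 1)).take (j - i)).length = min (j - i) (M.length - (i + 1)) := by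
      simp
    intro hnil
    rw [hnil] at this
    simp at this
    omega
  simp

theorem pv_nodup_prefList (p : String) : (pvPrefList (pvDP p)).Nodup := by
  rw [pvPrefList]
  refine List.Nodup.map_on ?_ List.nodup_range
  intro i hi j hj hij
  rw [List.mem_range] at hi hj
  rcases Nat.lt_trichotomy i j with h | h | h
  · exact absurd (congrArg (fun s => s.toList.length) hij)
      (Nat.ne_of_lt (pv_prefList_len_mono p i j h hj))
  · exact h
  · exact absurd (congrArg (fun s => s.toList.length) hij).symm
      (Nat.ne_of_lt (pv_prefList_len_mono p j i h hi))

theorem pv_sdir_lcp (d prev p : String) (hdp : pvSdir d p) :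
    (pvSdir d prev ↔ d.toList.length + 1 ≤ pvLcp prev.toList p.toList) := by
  have hlenp := hdp.length_le
  have hdp' := List.prefix_iff_eq_take.mp hdp
  simp only [List.length_append, List.length_cons, List.length_nil] at hlenp hdp'
  constructor
  · intro hprev
    have hlenv := hprev.length_le
    have hprev' := List.prefix_iff_eq_take.mp hprev
    simp only [List.length_append, List.length_cons, List.length_nil] at hlenv hprev'
    refine pvLcp_ge _ _ (d.toList.length + 1) (by omega) (by omega) ?_
    rw [← hprev', ← hdp']
  · intro h
    have hle := pvLcp_le prev.toList p.toList
    apply List.prefix_iff_eq_take.mpr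
    simp only [List.length_append, List.length_cons, List.length_nil]
    have h1 : prev.toList.take (d.toList.length + 1)
        = (prev.toList.take (pvLcp prev.toList p.toList)).take (d.toList.length + 1) := by
      rw [List.take_take]
      congr 1
      omega
    rw [h1, pvLcp_take, List.take_take]
    have h2 : min (d.toList.length + 1) (pvLcp prev.toList p.toList) = d.toList.length + 1 := by
      omega
    rw [h2, ← hdp']

theorem pv_take_dropLast' (parts : List String) (i : Nat) (hi : i + 1 ≤ parts.length - 1) :
    (parts.dropLast).take (i + 1) = parts.take (i + 1) := by
  rw [List.dropLast_eq_take, List.take_take]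
  congr 1
  omega

theorem pv_getD_single (parts : List String) (h : parts.length = 1) :
    PySem.List.pyGetD parts 0 "" = PySem.List.pyGetD parts (-1) "" := by
  rcases List.length_eq_one_iff.mp h with ⟨x, rfl⟩
  simp [PySem.List.pyGetD, PySem.List.pyGet?, PySem.List.pyIdx?]

theorem pv_A_prefix (parts : List String) (s : PySem.Set String) :
    (PySem.List.pyRange 1 (parts.length : Int)).foldl
      (fun s i => PySem.Set.add s (PySem.Str.join "/" (PySem.List.slice parts none (some i)))) s
    = (pvPrefList parts.dropLast).foldl PySem.Set.add s := by
  rw [PySem.List.pyRange_one, List.foldl_map, pvPrefList, List.foldl_map]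
  have hn : ((parts.length : Int) - 1).toNat = parts.dropLast.length := by
    rw [List.length_dropLast]
    omega
  rw [hn]
  refine PySem.List.foldl_congr_mem _ _ _ _ ?_
  intro acc k hk
  have hk' : k + 1 ≤ parts.length - 1 := by
    have := List.mem_range.mp hk
    rw [List.length_dropLast] at this
    omega
  have h1 : (0 : Int) ≤ 1 + (k : Int) := by omega
  rw [PySem.List.slice_to parts h1]
  have h2 : ((1 : Int) + (k : Int)).toNat = k + 1 := by omega
  rw [h2, ← pv_take_dropLast' parts k hk']

theorem pv_A_phase1 (L : List String) (d : PySem.Dict String (List (String × String)))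
    (s : PySem.Set String) :
    L.foldl
      (fun (st : PySem.Dict String (List (String × String)) × PySem.Set String) rel_path =>
        let parts := pvSplitSlash rel_path
        if parts.length = 1 then
          (st.1.modify "" [] (fun l => l ++ [(PySem.List.pyGetD parts 0 "", rel_path)]), st.2)
        else
          let dir_path := PySem.Str.join "/" (PySem.List.slice parts none (some (-1)))
          let filename := PySem.List.pyGetD parts (-1) ""
          let dc := st.1.modify dir_path [] (fun l => l ++ [(filename, rel_path)])
          let ad := (PySem.List.pyRange 1 (parts.length : Int)).foldl
            (fun s i => PySem.Set.add s (PySem.Str.join "/" (PySem.List.slice parts none (some i)))) st.2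
          (dc, ad))
      (d, s)
    = (L.foldl pvStepD d, L.foldl pvAddDirs s) := by
  induction L generalizing d s with
  | nil => rfl
  | cons rel t ih =>
    simp only [List.foldl_cons]
    by_cases h1 : (pvSplitSlash rel).length = 1
    · rw [if_pos h1]
      rcases List.length_eq_one_iff.mp h1 with ⟨x, hx⟩
      have hst : pvStepD d rel
          = d.modify "" [] (fun l => l ++ [(PySem.List.pyGetD (pvSplitSlash rel) 0 "", rel)]) := by
        rw [pvStepD, PySem.List.slice_to_neg_one, hx, ← hx, ← pv_getD_single _ h1, hx]
        rfl
      have had : pvAddDirs s rel = s := by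
        rw [pvAddDirs, pvDP, pvPrefList, hx]
        rfl
      rw [ih, hst, had]
    · rw [if_neg h1]
      rw [ih, pv_A_prefix]
      have hst : pvStepD d rel
          = d.modify (PySem.Str.join "/" (PySem.List.slice (pvSplitSlash rel) none (some (-1)))) []
              (fun l => l ++ [(PySem.List.pyGetD (pvSplitSlash rel) (-1) "", rel)]) := rfl
      rw [hst]
      rfl

theorem pv_join_singleton_str (a : String) : PySem.Str.join "/" [a] = a := by
  apply String.ext_iff.mpr
  rw [PySem.Str.toList_join]
  simp [PySem.Chars.join_singleton]

theorem pv_join_glue (a b : String) (l : List String) :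
    PySem.Str.join "/" ((a ++ "/" ++ b) :: l) = PySem.Str.join "/" (a :: b :: l) := by
  apply String.ext_iff.mpr
  rw [PySem.Str.toList_join, PySem.Str.toList_join]
  simp only [List.map_cons, show "/".toList = ['/'] from rfl]
  have htl : (a ++ "/" ++ b).toList = a.toList ++ '/' :: b.toList := by
    rw [String.toList_append, String.toList_append]
    simp [show "/".toList = ['/'] from rfl]
  cases l with
  | nil =>
    simp only [List.map_nil]
    rw [PySem.Chars.join_singleton, PySem.Chars.join_cons_cons, PySem.Chars.join_singleton, htl]
    simp
  | cons c cl =>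
    simp only [List.map_cons]
    rw [PySem.Chars.join_cons_cons, PySem.Chars.join_cons_cons, PySem.Chars.join_cons_cons, htl]
    simp

theorem pv_B_inner (rest : List String) : ∀ (o : List String) (first : String) (k : Nat),
    rest.foldl (fun (q : List String × String) part =>
        ((if (k : Int) ≤ PySem.Str.len q.2 then q.1 ++ [q.2] else q.1), q.2 ++ "/" ++ part))
      (o, first)
    = (o ++ ((List.range rest.length).map
          (fun i => PySem.Str.join "/" ((first :: rest).take (i + 1)))).filter
          (fun x => decide ((k : Int) ≤ PySem.Str.len x)),
       PySem.Str.join "/" (first :: rest)) := by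
  induction rest with
  | nil =>
    intro o first k
    simp [pv_join_singleton_str]
  | cons r rr ih =>
    intro o first k
    rw [List.foldl_cons, ih]
    have hmap : (List.range (r :: rr).length).map
          (fun i => PySem.Str.join "/" ((first :: r :: rr).take (i + 1)))
        = first :: (List.range rr.length).map
          (fun i => PySem.Str.join "/" (((first ++ "/" ++ r) :: rr).take (i + 1))) := by
      rw [List.length_cons, List.range_succ_eq_map, List.map_cons, List.map_map]
      refine congrArg₂ List.cons ?_ ?_
      · rw [List.take_succ_cons, List.take_zero, pv_join_singleton_str]
      · refine List.map_congr_left ?_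
        intro i _
        show PySem.Str.join "/" ((first :: r :: rr).take (i + 1 + 1)) = _
        rw [List.take_succ_cons, List.take_succ_cons,
          ← pv_join_glue first r (rr.take i), List.take_succ_cons]
    rw [hmap, List.filter_cons, ← pv_join_glue first r rr]
    by_cases hcond : k ≤ first.length <;> simp [hcond]

theorem pv_emit_eq (prev rel : String) (p0 : String) (ptl : List String)
    (hp : pvSplitSlash rel = p0 :: ptl) :
    pvEmit prev rel
      = ((List.range ptl.length).map
          (fun i => PySem.Str.join "/" ((p0 :: ptl).take (i + 1)))).filter
          (fun x => decide ((pvLcp prev.toList rel.toList : Int) ≤ PySem.Str.len x)) := by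
  rw [pvEmit, pvPrefList]
  congr 1
  rw [pvDP, hp]
  have hlen : ((p0 :: ptl).dropLast).length = ptl.length := by simp
  rw [hlen]
  refine List.map_congr_left ?_
  intro i hi
  rw [List.mem_range] at hi
  rw [pv_take_dropLast' (p0 :: ptl) i (by simp; omega)]

theorem pv_B_phase1 (L : List String) : ∀ (d : PySem.Dict String (List (String × String)))
    (o : List String) (prev : String),
    L.foldl
      (fun (st : PySem.Dict String (List (String × String)) × List String × String) rel_path =>
        let k := pvLcp st.2.2.toList rel_path.toList
        let parts := pvSplitSlash rel_path
        let dc := st.1.modify (PySem.Str.join "/" (PySem.List.slice parts none (some (-1)))) []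
          (fun l => l ++ [(PySem.List.pyGetD parts (-1) "", rel_path)])
        let fin := (PySem.List.slice parts (some 1) none).foldl
          (fun (q : List String × String) part =>
            ((if (k : Int) ≤ PySem.Str.len q.2 then q.1 ++ [q.2] else q.1), q.2 ++ "/" ++ part))
          (st.2.1, PySem.List.pyGetD parts 0 "")
        (dc, fin.1, rel_path))
      (d, o, prev)
    = (L.foldl pvStepD d, o ++ pvBDirs prev L, L.getLastD prev) := by
  induction L with
  | nil => intro d o prev; simp [pvBDirs]
  | cons rel t ih =>
    intro d o prev
    rw [List.foldl_cons]
    obtain ⟨p0, ptl, hp⟩ := List.exists_cons_of_ne_nil (pv_splitSlash_ne_nil rel)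
    have hslice : PySem.List.slice (pvSplitSlash rel) (some 1) none = ptl := by
      rw [PySem.List.slice_from _ (by omega : (0:Int) ≤ 1), hp]
      simp
    have hget : PySem.List.pyGetD (pvSplitSlash rel) 0 "" = p0 := by
      rw [hp]
      simp [PySem.List.pyGetD, PySem.List.pyGet?, PySem.List.pyIdx?]
    simp only [hslice, hget]
    rw [pv_B_inner]
    show t.foldl _ (pvStepD d rel, o ++ _, rel) = _
    rw [ih]
    rw [← pv_emit_eq prev rel p0 ptl hp]
    rw [List.foldl_cons]
    show _ = (t.foldl pvStepD (pvStepD d rel), o ++ pvBDirs prev (rel :: t), (rel :: t).getLastD prev)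
    rw [List.getLastD_cons]
    show _ = (_, o ++ (pvEmit prev rel ++ pvBDirs rel t), t.getLastD rel)
    rw [← List.append_assoc]

theorem pv_between (u : List Char) (x y z : String)
    (hxy : x ≤ y) (hyz : y ≤ z) (hux : u <+: x.toList) (huz : u <+: z.toList) :
    u <+: y.toList :=
  pv_between_chars u x.toList y.toList z.toList (pv_le_lex hxy) (pv_le_lex hyz) hux huz

theorem pv_empty_le (q : String) : "" ≤ q := by
  rw [String.le_iff_toList_le]
  exact not_lt.mp (fun h => List.not_lex_nil ((List.lt_iff_lex_lt _ _).mp h))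

theorem pv_add_eq_emit (prev p : String) (s : PySem.Set String)
    (hiff : ∀ d, d ∈ pvPrefList (pvDP p) → (d ∈ s ↔ pvSdir d prev)) :
    pvAddDirs s p = s ++ pvEmit prev p := by
  rw [pvAddDirs, pv_foldl_add_eq_append _ (pv_nodup_prefList p), pvEmit]
  congr 1
  apply List.filter_congr
  intro x hx
  have h1 := hiff x hx
  have h2 := pv_sdir_lcp x prev p ((pv_mem_prefList_iff p x).mp hx)
  rw [PySem.Str.len_eq]
  cases hc : s.contains x with
  | true =>
    have hmem : x ∈ s := (PySem.Set.contains_iff s x).mp hc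
    have := h2.mp (h1.mp hmem)
    simp only [Bool.not_true]
    symm
    rw [decide_eq_false_iff_not]
    omega
  | false =>
    have hmem : x ∉ s := fun hm => by
      rw [(PySem.Set.contains_iff s x).mpr hm] at hc; cases hc
    have hns : ¬ pvSdir x prev := fun hsd => hmem (h1.mpr hsd)
    have hnot : ¬ (x.toList.length + 1 ≤ pvLcp prev.toList p.toList) := fun hle => hns (h2.mpr hle)
    simp only [Bool.not_false]
    symm
    rw [decide_eq_true_iff]
    omega

theorem pv_dirs_main (S : List String) : ∀ (ps : List String) (prev : String) (s : PySem.Set String),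
    S.Pairwise (· ≤ ·) → (∀ q ∈ S, prev ≤ q) → (∀ q ∈ ps, q ≤ prev) →
    (∀ d, d ∈ s ↔ ∃ q ∈ ps, pvSdir d q) → (∀ d, pvSdir d prev → d ∈ s) →
    S.foldl pvAddDirs s = s ++ pvBDirs prev S := by
  induction S with
  | nil => intro ps prev s _ _ _ _ _; simp [pvBDirs]
  | cons p t ih =>
    intro ps prev s hs hle h2 hmem hup
    have hprevp : prev ≤ p := hle p (by simp)
    have hiff : ∀ d, d ∈ pvPrefList (pvDP p) → (d ∈ s ↔ pvSdir d prev) := by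
      intro d hd
      have hdp : pvSdir d p := (pv_mem_prefList_iff p d).mp hd
      constructor
      · intro hds
        obtain ⟨q, hq, hdq⟩ := (hmem d).mp hds
        exact pv_between _ q prev p (h2 q hq) hprevp hdq hdp
      · exact hup d
    have hstep : pvAddDirs s p = s ++ pvEmit prev p := pv_add_eq_emit prev p s hiff
    rw [List.foldl_cons]
    have hrec := ih (ps ++ [p]) p (pvAddDirs s p) hs.of_cons
      (fun q hq => List.rel_of_pairwise_cons hs hq)
      (fun q hq => by
        rcases List.mem_append.mp hq with hq | hq
        · exact le_trans (h2 q hq) hprevp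
        · rw [List.mem_singleton.mp hq])
      (fun d => by
        rw [pvAddDirs, pv_mem_foldl_add_iff]
        constructor
        · rintro (hds | hdl)
          · obtain ⟨q, hq, hdq⟩ := (hmem d).mp hds
            exact ⟨q, by simp [hq], hdq⟩
          · exact ⟨p, by simp, (pv_mem_prefList_iff p d).mp hdl⟩
        · rintro ⟨q, hq, hdq⟩
          rcases List.mem_append.mp hq with hq | hq
          · exact Or.inl ((hmem d).mpr ⟨q, hq, hdq⟩)
          · rw [List.mem_singleton.mp hq] at hdq
            exact Or.inr ((pv_mem_prefList_iff p d).mpr hdq))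
      (fun d hdp => by
        rw [pvAddDirs, pv_mem_foldl_add_iff]
        exact Or.inr ((pv_mem_prefList_iff p d).mpr hdp))
    rw [hrec, hstep]
    show s ++ pvEmit prev p ++ pvBDirs p t = s ++ (pvEmit prev p ++ pvBDirs p t)
    rw [List.append_assoc]

theorem pv_nodup_addDirs (S : List String) : ∀ (s : PySem.Set String), s.Nodup →
    (S.foldl pvAddDirs s).Nodup := by
  induction S with
  | nil => exact fun s hs => hs
  | cons p t ih =>
    intro s hs
    rw [List.foldl_cons]
    exact ih _ (pv_nodup_foldl_add _ _ hs)

-- the all_dirs list both programs produce, from the empty initial state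
theorem pv_dirs_final (S : List String) (hs : S.Pairwise (· ≤ ·)) :
    S.foldl pvAddDirs PySem.Set.empty = pvBDirs "" S := by
  have h := pv_dirs_main S [] "" PySem.Set.empty hs
    (fun q _ => pv_empty_le q) (by simp)
    (by intro d; simp [PySem.Set.empty])
    (by
      intro d h
      have := h.length_le
      simp [String.toList_empty] at this)
  simpa using h

-- ===== VERDICT (by name: the statement is the Claim_ definition above) =====
theorem populate_dir_contents_py_spec : Claim_equal_populate_dir_contents_py := by
  intro paths _
  unfold Spec_populate_dir_contents_py populate_dir_contents_py populate_dir_contents_py_alt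
  rw [pv_A_phase1, pv_B_phase1]
  dsimp only
  have hs : (PySem.List.sorted paths (fun x => x) false).Pairwise (· ≤ ·) :=
    PySem.List.sorted_pairwise paths (fun x => x)
  have hnd : ((PySem.List.sorted paths (fun x => x) false).foldl pvAddDirs PySem.Set.empty).Nodup :=
    pv_nodup_addDirs _ _ (by simp [PySem.Set.empty])
  rw [pv_dirs_final _ hs] at hnd ⊢
  rw [List.nil_append, pv_ofList_eq_self _ hnd]
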